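-- pv_equiv track=rewrite | github.com/MrBrantCode/unitest_baseline | mut_generate/mist_train_taco/taco_12418/solution.py | count_prime_pairs_reverting_to_prime
-- ===== SOURCE A (Python) =====
-- import itertools
--
-- def count_prime_pairs_reverting_to_prime(start, end):
--     def is_prime(n):
--         if n <= 1:
--             return False
--         if n <= 3:
--             return True
--         if n % 2 == 0 or n % 3 == 0:
--             return False
--         i = 5
--         while i * i <= n:
--             if n % i == 0 or n % (i + 2) == 0:
--                 return False
--             i += 6
--         return True
--
--     def sum_of_digits(n):
--         return sum(map(int, str(n)))
--
--     primes = set([2] + [n for n in range(3, end, 2) if is_prime(n)])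
--     prime_pairs = itertools.combinations_with_replacement([p for p in primes if start <= p < end], 2)
--
--     count = 0
--     for x, y in prime_pairs:
--         product = x * y
--         digit_sum = sum_of_digits(product)
--         if is_prime(digit_sum):
--             count += 1
--
--     return count
-- ===== SOURCE B (Python) =====
-- def count_prime_pairs_reverting_to_prime(start, end):
--     def sieve(n):
--         # classic Sieve of Eratosthenes flags for 0..n-1 (n >= 2 at both call sites)
--         flags = bytearray([1]) * n
--         flags[0] = flags[1] = 0
--         for i in range(2, n):
--             for j in range(2 * i, n, i):
--                 flags[j] = 0
--         return flags
--
--     def digit_sum(m):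
--         s = 0
--         while m > 0:
--             s += m % 10
--             m //= 10
--         return s
--
--     m = max(end, 2)
--     flags = sieve(m)
--     primes = [p for p in range(max(start, 2), end) if flags[p]]
--
--     # every pair product is < m*m, so its digit sum is at most 9 * len(digits of m*m)
--     bound = 0
--     t = m * m
--     while t > 0:
--         bound += 9
--         t //= 10
--     small = sieve(bound + 1)
--
--     count = 0
--     n = len(primes)
--     for i in range(n):
--         for j in range(i, n):
--             if small[digit_sum(primes[i] * primes[j])]:
--                 count += 1
--     return count
-- ===== Notes on version B (the rewrite author's own statement) =====
-- stated objective: alternative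
-- what changed: B generates primes with a Sieve of Eratosthenes (a boolean table built by crossing out multiples) instead of A's per-number 6k±1 trial division, tests whether each pair product's digit sum is prime by a single lookup in a second, small sieve table instead of running trial division per pair, and computes digit sums arithmetically (%10, //10) instead of summing int(c) over str(product); the pair enumeration is index-based rather than itertools.combinations_with_replacement over a set.
import Mathlib
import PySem

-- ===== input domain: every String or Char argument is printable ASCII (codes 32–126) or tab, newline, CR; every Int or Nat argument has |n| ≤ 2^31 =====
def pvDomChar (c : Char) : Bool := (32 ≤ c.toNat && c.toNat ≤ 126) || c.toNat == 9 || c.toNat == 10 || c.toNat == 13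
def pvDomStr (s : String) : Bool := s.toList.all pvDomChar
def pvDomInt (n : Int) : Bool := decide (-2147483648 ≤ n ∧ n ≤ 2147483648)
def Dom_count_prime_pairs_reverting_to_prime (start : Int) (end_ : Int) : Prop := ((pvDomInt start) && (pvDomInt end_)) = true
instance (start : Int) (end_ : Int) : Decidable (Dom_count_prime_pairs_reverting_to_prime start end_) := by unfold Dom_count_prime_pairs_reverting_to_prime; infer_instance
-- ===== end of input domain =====

-- B generates the primes with a Sieve of Eratosthenes (boolean table, crossing out multiples)
-- instead of A's per-number 6k±1 trial division, tests the digit-sum of each pair product by a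
-- second, small sieve lookup instead of trial division, and computes digit sums arithmetically
-- (% 10, // 10) instead of through str(); the pair loop runs over indices, not itertools.

-- ===== PORT A =====

-- while i * i <= n: if n % i == 0 or n % (i + 2) == 0: return False; i += 6
-- (loop carried out on Nat: it is only entered with n ≥ 5, i = 5, and i only grows, so
-- Nat arithmetic agrees with Python's on every reached state)
def pvA_isPrimeLoop (n i : Nat) : Bool :=
  if i * i ≤ n then
    if n % i == 0 || n % (i + 2) == 0 then false else pvA_isPrimeLoop n (i + 6)
  else true
termination_by n + 1 - i
decreasing_by
  have hi : i ≤ n := by nlinarith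
  omega

def pvA_isPrime (n : Int) : Bool :=
  if n ≤ 1 then false
  else if n ≤ 3 then true
  else if PySem.Int.mod n 2 == 0 || PySem.Int.mod n 3 == 0 then false
  else pvA_isPrimeLoop n.toNat 5

-- sum(map(int, str(n))); int(c) = PySem.Int.ofChars? [c]; the getD 0 is unreachable:
-- this helper is only applied to nonnegative numbers, whose str consists of digits
def pvA_digitSum (n : Int) : Int :=
  ((PySem.Int.toChars n).map (fun c => (PySem.Int.ofChars? [c]).getD 0)).sum

-- itertools.combinations_with_replacement(l, 2), in iteration order
def pvA_cwr : List Int → List (Int × Int)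
  | [] => []
  | x :: xs => (x :: xs).map (fun y => (x, y)) ++ pvA_cwr xs

def count_prime_pairs_reverting_to_prime (start : Int) (end_ : Int) : Int :=
  let primes := PySem.Set.ofList ((2 : Int) :: (PySem.List.pyRange 3 end_ 2).filter (fun n => pvA_isPrime n))
  let filtered := primes.filter (fun p => decide (start ≤ p) && decide (p < end_))
  (pvA_cwr filtered).foldl
    (fun c xy => if pvA_isPrime (pvA_digitSum (xy.1 * xy.2)) then c + 1 else c) 0

-- ===== PORT B =====

-- def sieve(n): flags = bytearray([1]) * n; flags[0] = flags[1] = 0;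
--   for i in range(2, n): for j in range(2*i, n, i): flags[j] = 0
-- (pySetD is the total form of flags[k] = 0: both call sites pass n ≥ 2 and every
-- index written is nonnegative and < n, so no IndexError is reachable)
def pvSieve (n : Int) : List Bool :=
  let flags := PySem.List.pySetD (PySem.List.pySetD (List.replicate n.toNat true) 0 false) 1 false
  (PySem.List.pyRange 2 n 1).foldl
    (fun fl i => (PySem.List.pyRange (2 * i) n i).foldl
      (fun fl j => PySem.List.pySetD fl j false) fl)
    flags

-- s = 0; while m > 0: s += m % 10; m //= 10
def pvB_dsum (m : Int) (s : Int) : Int :=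
  if 0 < m then pvB_dsum (PySem.Int.floordiv m 10) (s + PySem.Int.mod m 10) else s
termination_by m.toNat
decreasing_by
  rw [PySem.Int.floordiv_eq_ediv_of_pos (by norm_num)]
  omega

-- bound = 0; t = m*m; while t > 0: bound += 9; t //= 10
def pvB_bound (t : Int) (b : Int) : Int :=
  if 0 < t then pvB_bound (PySem.Int.floordiv t 10) (b + 9) else b
termination_by t.toNat
decreasing_by
  rw [PySem.Int.floordiv_eq_ediv_of_pos (by norm_num)]
  omega

def count_prime_pairs_reverting_to_prime_alt (start : Int) (end_ : Int) : Int :=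
  let m := max end_ 2
  let flags := pvSieve m
  let primes := (PySem.List.pyRange (max start 2) end_ 1).filter
    (fun p => PySem.List.pyGetD flags p false)
  let bound := pvB_bound (m * m) 0
  let small := pvSieve (bound + 1)
  let n := PySem.List.len primes
  -- for i in range(n): for j in range(i, n): …  (pyGetD is primes[i] / small[ds]: all
  -- indices are nonnegative and in range at every reached state)
  (PySem.List.pyRange 0 n 1).foldl (fun c i =>
    (PySem.List.pyRange i n 1).foldl (fun c j =>
      if PySem.List.pyGetD small
          (pvB_dsum (PySem.List.pyGetD primes i 0 * PySem.List.pyGetD primes j 0) 0) false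
      then c + 1 else c) c) 0

-- ===== PRECONDITION & SPEC =====
def Spec_count_prime_pairs_reverting_to_prime (start : Int) (end_ : Int) (out : Int) : Prop := out = count_prime_pairs_reverting_to_prime_alt start end_
instance (start : Int) (end_ : Int) (out : Int) : Decidable (Spec_count_prime_pairs_reverting_to_prime start end_ out) := by unfold Spec_count_prime_pairs_reverting_to_prime; infer_instance

-- ===== CLAIM (what is proved, stated in full; the proofs are below) =====
def Claim_equal_count_prime_pairs_reverting_to_prime : Prop := ∀ (start : Int) (end_ : Int), Dom_count_prime_pairs_reverting_to_prime start end_ → Spec_count_prime_pairs_reverting_to_prime start end_ (count_prime_pairs_reverting_to_prime start end_)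

-- ===== LEMMAS AND PROOFS =====

-- ---------- A's trial-division loop decides "no divisor ≥ i below the square root" ----------

lemma pvA_isPrimeLoop_spec (n i : Nat) :
    ¬ 2 ∣ n → ¬ 3 ∣ n → i % 6 = 5 → (∀ m, 5 ≤ m → m < i → ¬ m ∣ n) →
    (pvA_isPrimeLoop n i = true ↔ ∀ m, i ≤ m → m * m ≤ n → ¬ m ∣ n) := by
  induction i using pvA_isPrimeLoop.induct (n := n) with
  | case1 x hle heq =>
    intro h2 h3 hx6 hprev
    have hx5 : 5 ≤ x := by omega
    rw [pvA_isPrimeLoop, if_pos hle, if_pos heq]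
    simp only [Bool.false_eq_true, false_iff]
    push Not
    have hdvd : x ∣ n ∨ (x + 2) ∣ n := by
      simp only [Bool.or_eq_true, beq_iff_eq] at heq
      exact heq.imp Nat.dvd_of_mod_eq_zero Nat.dvd_of_mod_eq_zero
    rcases hdvd with hd | hd
    · exact ⟨x, le_refl x, hle, hd⟩
    · by_cases hbig : (x + 2) * (x + 2) ≤ n
      · exact ⟨x + 2, by omega, hbig, hd⟩
      · obtain ⟨c, hc⟩ := hd
        have hn0 : 0 < n := by
          rcases Nat.eq_zero_or_pos n with rfl | h
          · exact absurd (dvd_zero 2) h2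
          · exact h
        have hcdvd : c ∣ n := ⟨x + 2, by rw [hc]; ring⟩
        have hc0 : c ≠ 0 := by rintro rfl; omega
        have hc1 : c ≠ 1 := by rintro rfl; nlinarith
        have hc2 : c ≠ 2 := by rintro rfl; exact h2 hcdvd
        have hc3 : c ≠ 3 := by rintro rfl; exact h3 hcdvd
        have hc4 : c ≠ 4 := by
          rintro rfl; exact h2 (dvd_trans (by norm_num) hcdvd)
        have hc5 : 5 ≤ c := by omega
        have hclt : c < x + 2 := by by_contra hge; push Not at hge; nlinarith
        have hcx : ¬ c < x := fun hlt => hprev c hc5 hlt hcdvd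
        have hceq : c = x := by
          rcases (by omega : c = x ∨ c = x + 1) with rfl | h1
          · rfl
          · exact absurd (dvd_trans (by omega : 2 ∣ c) hcdvd) h2
        subst hceq
        exact ⟨c, le_refl c, hle, hcdvd⟩
  | case2 x hle hne ih =>
    intro h2 h3 hx6 hprev
    have hx5 : 5 ≤ x := by omega
    rw [pvA_isPrimeLoop, if_pos hle, if_neg hne]
    have hnd : ¬ x ∣ n ∧ ¬ (x + 2) ∣ n := by
      refine ⟨fun hd => ?_, fun hd => ?_⟩ <;>
        exact hne (by simp [Nat.mod_eq_zero_of_dvd hd])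
    have hnone : ∀ m, 5 ≤ m → m < x + 6 → ¬ m ∣ n := by
      intro m h5m hlt hdvd
      by_cases hc : m < x
      · exact hprev m h5m hc hdvd
      · rcases (by omega : m = x ∨ m = x + 1 ∨ m = x + 2 ∨ m = x + 3 ∨ m = x + 4 ∨ m = x + 5)
          with rfl | rfl | rfl | rfl | rfl | rfl
        · exact hnd.1 hdvd
        · exact h2 (dvd_trans (by omega : 2 ∣ (x + 1)) hdvd)
        · exact hnd.2 hdvd
        · exact h2 (dvd_trans (by omega : 2 ∣ (x + 3)) hdvd)
        · exact h3 (dvd_trans (by omega : 3 ∣ (x + 4)) hdvd)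
        · exact h2 (dvd_trans (by omega : 2 ∣ (x + 5)) hdvd)
    rw [ih h2 h3 (by omega) (fun m h5 hlt => hnone m h5 (by omega))]
    constructor
    · intro h m hm hmm hdvd
      by_cases hc : x + 6 ≤ m
      · exact h m hc hmm hdvd
      · exact hnone m (by omega) (by omega) hdvd
    · intro h m hm hmm
      exact h m (by omega) hmm
  | case3 x hgt =>
    intro _ _ _ _
    rw [pvA_isPrimeLoop, if_neg hgt]
    simp only [true_iff]
    intro m hm hmm _
    exact hgt (le_trans (Nat.mul_le_mul hm hm) hmm)

-- mathematical digit sum and digit count, the common reference points of the two ports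
def pvDsN (m : Nat) : Nat :=
  if m = 0 then 0 else m % 10 + pvDsN (m / 10)
decreasing_by omega

def pvNdig (t : Nat) : Nat :=
  if t = 0 then 0 else pvNdig (t / 10) + 1
decreasing_by omega

lemma pv_ndig_pos (t : Nat) (h : t ≠ 0) : 1 ≤ pvNdig t := by
  rw [pvNdig, if_neg h]; omega

lemma pvB_bound_eq (t b : Int) (h : 0 ≤ t) : pvB_bound t b = b + 9 * (pvNdig t.toNat : Int) := by
  induction t, b using pvB_bound.induct with
  | case1 t b hpos ih =>
    rw [pvB_bound, if_pos hpos]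
    rw [ih (by rw [PySem.Int.floordiv_eq_ediv_of_pos (by norm_num)]; omega)]
    rw [PySem.Int.floordiv_eq_ediv_of_pos (by norm_num)]
    have h1 : (t / 10).toNat = t.toNat / 10 := by omega
    rw [h1]
    have h3 : pvNdig t.toNat = pvNdig (t.toNat / 10) + 1 := by
      rw [pvNdig, if_neg (by omega)]
    rw [h3]
    push_cast
    ring
  | case2 t b hpos =>
    rw [pvB_bound, if_neg hpos]
    have : t = 0 := by omega
    subst this
    rw [show pvNdig (Int.toNat 0) = 0 from by rw [pvNdig]; rfl]
    simp

-- ---------- digit-sum and string lemmas ----------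

lemma pv_digitChar_bound : ∀ m, m < 10 → 48 ≤ (Nat.digitChar m).toNat ∧ (Nat.digitChar m).toNat ≤ 57 := by
  decide

lemma pv_toDigitsCore_mem (fuel : Nat) : ∀ (n : Nat) (ds : List Char),
    (∀ c ∈ ds, 48 ≤ c.toNat ∧ c.toNat ≤ 57) →
    ∀ c ∈ Nat.toDigitsCore 10 fuel n ds, 48 ≤ c.toNat ∧ c.toNat ≤ 57 := by
  induction fuel with
  | zero => intro n ds hds; simpa [Nat.toDigitsCore] using hds
  | succ fuel ih =>
    intro n ds hds c hc
    rw [Nat.toDigitsCore] at hc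
    split at hc
    · rcases List.mem_cons.mp hc with h | h
      · subst h; exact pv_digitChar_bound _ (Nat.mod_lt _ (by norm_num))
      · exact hds c h
    · refine ih (n / 10) _ ?_ c hc
      intro d hd
      rcases List.mem_cons.mp hd with h | h
      · subst h; exact pv_digitChar_bound _ (Nat.mod_lt _ (by norm_num))
      · exact hds d h

lemma pv_toChars_digits (n : Int) (h : 0 ≤ n) :
    ∀ c ∈ PySem.Int.toChars n, 48 ≤ c.toNat ∧ c.toNat ≤ 57 := by
  unfold PySem.Int.toChars
  rw [if_neg (by omega)]
  unfold Nat.toDigits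
  exact pv_toDigitsCore_mem _ _ [] (by simp)

lemma pv_ofChars_digit (c : Char) (h1 : 48 ≤ c.toNat) (h2 : c.toNat ≤ 57) :
    PySem.Int.ofChars? [c] = some ((c.toNat : Int) - 48) := by
  have hc : c.toNat = 48 ∨ c.toNat = 49 ∨ c.toNat = 50 ∨ c.toNat = 51 ∨ c.toNat = 52 ∨
      c.toNat = 53 ∨ c.toNat = 54 ∨ c.toNat = 55 ∨ c.toNat = 56 ∨ c.toNat = 57 := by omega
  rcases hc with h | h | h | h | h | h | h | h | h | h <;>
    (first
      | (have : c = '0' := Char.ext (UInt32.toNat_inj.mp h); subst this; decide)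
      | (have : c = '1' := Char.ext (UInt32.toNat_inj.mp h); subst this; decide)
      | (have : c = '2' := Char.ext (UInt32.toNat_inj.mp h); subst this; decide)
      | (have : c = '3' := Char.ext (UInt32.toNat_inj.mp h); subst this; decide)
      | (have : c = '4' := Char.ext (UInt32.toNat_inj.mp h); subst this; decide)
      | (have : c = '5' := Char.ext (UInt32.toNat_inj.mp h); subst this; decide)
      | (have : c = '6' := Char.ext (UInt32.toNat_inj.mp h); subst this; decide)
      | (have : c = '7' := Char.ext (UInt32.toNat_inj.mp h); subst this; decide)
      | (have : c = '8' := Char.ext (UInt32.toNat_inj.mp h); subst this; decide)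
      | (have : c = '9' := Char.ext (UInt32.toNat_inj.mp h); subst this; decide))

lemma pv_digitChar_val (m : Nat) (h : m < 10) :
    ((Nat.digitChar m).toNat : Int) - 48 = (m : Int) := by
  interval_cases m <;> decide

lemma pv_digits_sum (fuel : Nat) : ∀ (n : Nat) (ds : List Char), n < fuel →
    ((Nat.toDigitsCore 10 fuel n ds).map (fun c => (c.toNat : Int) - 48)).sum
      = (pvDsN n : Int) + ((ds.map (fun c => (c.toNat : Int) - 48)).sum) := by
  induction fuel with
  | zero => intro n ds h; omega
  | succ fuel ih =>
    intro n ds hn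
    rw [Nat.toDigitsCore]
    have hds0 : pvDsN 0 = 0 := by rw [pvDsN]; norm_num
    split
    · rename_i hdiv
      rw [List.map_cons, List.sum_cons, pv_digitChar_val _ (Nat.mod_lt _ (by norm_num))]
      have hthis : pvDsN n = n % 10 := by
        rw [pvDsN]
        split
        · omega
        · rw [hdiv, hds0]
          omega
      rw [hthis]
    · rename_i hdiv
      have hlt : n / 10 < fuel := by omega
      rw [ih (n / 10) _ hlt, List.map_cons, List.sum_cons,
        pv_digitChar_val _ (Nat.mod_lt _ (by norm_num))]
      have hthis : pvDsN n = n % 10 + pvDsN (n / 10) := by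
        rw [pvDsN, if_neg (by omega)]
      rw [hthis]
      push_cast
      ring

lemma pvA_digitSum_eq (n : Int) (h : 0 ≤ n) : pvA_digitSum n = (pvDsN n.toNat : Int) := by
  unfold pvA_digitSum
  have hd := pv_toChars_digits n h
  rw [List.map_congr_left (g := fun c => (c.toNat : Int) - 48)
      (fun c hc => by rw [pv_ofChars_digit c (hd c hc).1 (hd c hc).2]; rfl)]
  have : PySem.Int.toChars n = Nat.toDigitsCore 10 (n.toNat + 1) n.toNat [] := by
    unfold PySem.Int.toChars
    rw [if_neg (by omega)]
    rfl
  rw [this, pv_digits_sum (n.toNat + 1) n.toNat [] (by omega)]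
  simp

lemma pvA_isPrime_eq (n : Int) (h0 : 0 ≤ n) :
    pvA_isPrime n = decide (Nat.Prime n.toNat) := by
  rw [Bool.eq_iff_iff, decide_eq_true_eq]
  by_cases h1 : n ≤ 1
  · rw [pvA_isPrime, if_pos h1]
    simp only [Bool.false_eq_true, false_iff]
    intro hp
    have := hp.two_le
    omega
  by_cases he2 : n = 2
  · subst he2
    rw [show pvA_isPrime 2 = true from by decide]
    simpa using Nat.prime_two
  by_cases he3 : n = 3
  · subst he3
    rw [show pvA_isPrime 3 = true from by decide]
    simpa using Nat.prime_three
  have h4 : 4 ≤ n := by omega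
  set N := n.toNat with hN
  have hnN : n = (N : Int) := by omega
  have hN4 : 4 ≤ N := by omega
  rw [pvA_isPrime, if_neg (by omega), if_neg (by omega)]
  by_cases hd2 : 2 ∣ N
  · have : PySem.Int.mod n 2 = 0 := by
      rw [PySem.Int.mod_eq_zero_iff_dvd, hnN]
      exact_mod_cast hd2
    rw [if_pos (by simp only [this, beq_self_eq_true, Bool.true_or])]
    simp only [Bool.false_eq_true, false_iff]
    intro hp
    rcases hp.eq_one_or_self_of_dvd 2 hd2 with h | h <;> omega
  by_cases hd3 : 3 ∣ N
  · have : PySem.Int.mod n 3 = 0 := by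
      rw [PySem.Int.mod_eq_zero_iff_dvd, hnN]
      exact_mod_cast hd3
    rw [if_pos (by simp only [this, beq_self_eq_true, Bool.or_true])]
    simp only [Bool.false_eq_true, false_iff]
    intro hp
    rcases hp.eq_one_or_self_of_dvd 3 hd3 with h | h <;> omega
  · have hm2 : ¬ (PySem.Int.mod n 2 == 0) = true := by
      simp only [beq_iff_eq, PySem.Int.mod_eq_zero_iff_dvd, hnN]
      exact_mod_cast hd2
    have hm3 : ¬ (PySem.Int.mod n 3 == 0) = true := by
      simp only [beq_iff_eq, PySem.Int.mod_eq_zero_iff_dvd, hnN]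
      exact_mod_cast hd3
    rw [if_neg (by simp only [Bool.or_eq_true]; tauto)]
    rw [pvA_isPrimeLoop_spec N 5 hd2 hd3 rfl (by omega)]
    rw [Nat.prime_def_le_sqrt]
    constructor
    · intro h
      refine ⟨by omega, fun m hm2' hmsqrt hdvd => ?_⟩
      have hmm : m * m ≤ N := by
        have := Nat.sqrt_le' N
        calc m * m ≤ N.sqrt * N.sqrt := Nat.mul_le_mul hmsqrt hmsqrt
        _ ≤ N := by have := Nat.sqrt_le' N; nlinarith
      rcases (by omega : m = 2 ∨ m = 3 ∨ m = 4 ∨ 5 ≤ m) with rfl | rfl | rfl | h5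
      · exact hd2 hdvd
      · exact hd3 hdvd
      · exact hd2 (dvd_trans (by norm_num) hdvd)
      · exact h m h5 hmm hdvd
    · rintro ⟨-, h⟩ m hm5 hmm hdvd
      exact h m (by omega) (by rwa [Nat.le_sqrt]) hdvd

lemma pvB_dsum_eq (m s : Int) (h : 0 ≤ m) : pvB_dsum m s = s + (pvDsN m.toNat : Int) := by
  induction m, s using pvB_dsum.induct with
  | case1 m s hpos ih =>
    rw [pvB_dsum, if_pos hpos]
    rw [ih (by rw [PySem.Int.floordiv_eq_ediv_of_pos (by norm_num)]; omega)]
    rw [PySem.Int.floordiv_eq_ediv_of_pos (by norm_num), PySem.Int.mod_eq_emod_of_pos (by norm_num)]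
    have h1 : (m / 10).toNat = m.toNat / 10 := by omega
    have h2 : m % 10 = ((m.toNat % 10 : Nat) : Int) := by omega
    rw [h1, h2]
    have h3 : pvDsN m.toNat = m.toNat % 10 + pvDsN (m.toNat / 10) := by
      rw [pvDsN, if_neg (by omega)]
    rw [h3]
    push_cast
    ring
  | case2 m s hpos =>
    rw [pvB_dsum, if_neg hpos]
    have : m = 0 := by omega
    subst this
    rw [show pvDsN (Int.toNat 0) = 0 from by rw [pvDsN]; rfl]
    simp

lemma pv_dsN_le (k : Nat) : ∀ m : Nat, m < 10 ^ k → pvDsN m ≤ 9 * k := by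
  induction k with
  | zero => intro m hm; interval_cases m; simp [pvDsN]
  | succ k ih =>
    intro m hm
    rw [pvDsN]
    split
    · omega
    · have hd : m / 10 < 10 ^ k := by
        rw [Nat.div_lt_iff_lt_mul (by norm_num)]
        calc m < 10 ^ (k+1) := hm
        _ = 10 ^ k * 10 := by ring
      have := ih (m / 10) hd
      omega

lemma pv_lt_pow_ndig (t : Nat) : t < 10 ^ (pvNdig t) := by
  induction t using Nat.strong_induction_on with
  | _ t ih =>
    rw [pvNdig]
    split
    · omega
    · have := ih (t / 10) (by omega)
      rw [pow_succ]
      omega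

-- ---------- the sieve computes primality ----------

lemma pv_clear_fold (L : List Int) : ∀ (fl : List Bool) (p : Nat), (∀ j ∈ L, 0 ≤ j) → p < fl.length →
    (L.foldl (fun fl j => PySem.List.pySetD fl j false) fl)[p]? =
      if (p : Int) ∈ L then some false else fl[p]? := by
  induction L with
  | nil => intro fl p _ _; simp
  | cons x L ih =>
    intro fl p hL hp
    have hx0 : 0 ≤ x := hL x List.mem_cons_self
    rw [List.foldl_cons,
      ih (PySem.List.pySetD fl x false) p (fun j hj => hL j (List.mem_cons_of_mem _ hj))
        (by rw [PySem.List.length_pySetD]; exact hp),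
      PySem.List.pySetD_of_nonneg fl false hx0]
    by_cases hxp : x = (p : Int)
    · have hxe : x.toNat = p := by omega
      have h1 : (fl.set x.toNat false)[p]? = some false := by
        rw [List.getElem?_set]
        simp [hxe, hp]
      rw [h1]
      rw [if_pos (show ((p : Int)) ∈ x :: L by rw [hxp]; exact List.mem_cons_self)]
      split <;> rfl
    · have hne : x.toNat ≠ p := by omega
      have h1 : (fl.set x.toNat false)[p]? = fl[p]? := by
        rw [List.getElem?_set, if_neg hne]
      rw [h1]
      by_cases hm : ((p : Int)) ∈ L
      · rw [if_pos hm, if_pos (List.mem_cons_of_mem _ hm)]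
      · rw [if_neg hm, if_neg (by simp [List.mem_cons, Ne.symm hxp, hm])]

lemma pv_mem_marks (n : Int) (p : Nat) (hp : (p : Int) < n) :
    ((p : Int) ∈ (PySem.List.pyRange 2 n 1).flatMap (fun i => PySem.List.pyRange (2 * i) n i))
      ↔ ∃ i k : Nat, 2 ≤ i ∧ 2 ≤ k ∧ i * k = p := by
  rw [List.mem_flatMap]
  constructor
  · rintro ⟨i, hi, hj⟩
    obtain ⟨hi2, hin⟩ := PySem.List.mem_pyRange_one.mp hi
    have hipos : (0 : Int) < i := by omega
    obtain ⟨h2i, hpn, hdvd⟩ := (PySem.List.mem_pyRange_iff_of_pos hipos _).mp hj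
    have hdvdp : i ∣ (p : Int) := by
      have : i ∣ ((p : Int) - 2 * i) + 2 * i := by
        exact dvd_add hdvd ⟨2, by ring⟩
      simpa using this
    obtain ⟨k, hk⟩ := hdvdp
    have hk2 : 2 ≤ k := by nlinarith
    refine ⟨i.toNat, k.toNat, by omega, by omega, ?_⟩
    have : ((i.toNat * k.toNat : Nat) : Int) = (p : Int) := by
      push_cast
      rw [Int.toNat_of_nonneg (by omega), Int.toNat_of_nonneg (by omega)]
      omega
    exact_mod_cast this
  · rintro ⟨i, k, hi2, hk2, rfl⟩
    refine ⟨(i : Int), ?_, ?_⟩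
    · rw [PySem.List.mem_pyRange_one]
      constructor
      · exact_mod_cast hi2
      · have : i < i * k := by nlinarith
        have : (i : Int) < ((i * k : Nat) : Int) := by exact_mod_cast this
        omega
    · rw [PySem.List.mem_pyRange_iff_of_pos (by exact_mod_cast (by omega : 0 < i))]
      refine ⟨by push_cast; nlinarith, hp, ?_⟩
      push_cast
      exact ⟨(k : Int) - 2, by ring⟩

lemma pv_sieve_get (n : Int) (hn : 2 ≤ n) (p : Nat) (hp : p < n.toNat) :
    (pvSieve n)[p]? = some (decide (Nat.Prime p)) := by
  unfold pvSieve
  rw [← List.foldl_flatMap]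
  have hL : ∀ j ∈ (PySem.List.pyRange 2 n 1).flatMap (fun i => PySem.List.pyRange (2 * i) n i), (0:Int) ≤ j := by
    intro j hj
    obtain ⟨i, hi, hj'⟩ := List.mem_flatMap.mp hj
    obtain ⟨hi2, _⟩ := PySem.List.mem_pyRange_one.mp hi
    obtain ⟨h2i, _, _⟩ := (PySem.List.mem_pyRange_iff_of_pos (by omega) _).mp hj'
    omega
  have hinitlen : (PySem.List.pySetD (PySem.List.pySetD (List.replicate n.toNat true) 0 false) 1 false).length = n.toNat := by
    simp [PySem.List.length_pySetD]
  rw [pv_clear_fold _ _ p hL (by rw [hinitlen]; exact hp)]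
  have hinit : (PySem.List.pySetD (PySem.List.pySetD (List.replicate n.toNat true) 0 false) 1 false)[p]? =
      some (decide (2 ≤ p)) := by
    rw [PySem.List.pySetD_of_nonneg _ false (by norm_num : (0:Int) ≤ 1),
      PySem.List.pySetD_of_nonneg _ false (by norm_num : (0:Int) ≤ 0)]
    show ((List.replicate n.toNat true).set (0:Int).toNat false |>.set (1:Int).toNat false)[p]? = _
    rw [show ((0:Int).toNat) = 0 from rfl, show ((1:Int).toNat) = 1 from rfl,
      List.getElem?_set, List.getElem?_set]
    rcases (by omega : p = 0 ∨ p = 1 ∨ 2 ≤ p) with rfl | rfl | h2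
    · simp [hp]
    · simp [List.length_set, hp]
    · rw [if_neg (by omega), if_neg (by omega), List.getElem?_replicate, if_pos hp]
      simp [h2]
  by_cases hmem : ∃ i k : Nat, 2 ≤ i ∧ 2 ≤ k ∧ i * k = p
  · rw [if_pos ((pv_mem_marks n p (by omega)).mpr hmem)]
    obtain ⟨i, k, hi2, hk2, rfl⟩ := hmem
    have hnp : ¬ Nat.Prime (i * k) := by
      intro hpr
      rcases (Nat.Prime.eq_one_or_self_of_dvd hpr i ⟨k, rfl⟩) with h | h
      · omega
      · nlinarith
    simp [hnp]
  · rw [if_neg (fun h => hmem ((pv_mem_marks n p (by omega)).mp h)), hinit]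
    congr 1
    by_cases h2 : 2 ≤ p
    · have hpr : Nat.Prime p := by
        rw [Nat.prime_def_lt']
        refine ⟨h2, fun m hm2 hmp hdvd => ?_⟩
        obtain ⟨k, hk⟩ := hdvd
        have hk2 : 2 ≤ k := by
          rcases (by omega : k = 0 ∨ k = 1 ∨ 2 ≤ k) with rfl | rfl | h
          · omega
          · omega
          · exact h
        exact hmem ⟨m, k, hm2, hk2, hk.symm⟩
      simp [h2, hpr]
    · have : ¬ Nat.Prime p := fun hpr => h2 hpr.two_le
      simp [h2, this]

lemma pv_sieve_lookup (n p : Int) (hn : 2 ≤ n) (h0 : 0 ≤ p) (hp : p < n) :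
    PySem.List.pyGetD (pvSieve n) p false = decide (Nat.Prime p.toNat) := by
  have hcast : p = ((p.toNat : Nat) : Int) := by omega
  rw [hcast, PySem.List.pyGetD_natCast, List.getD_eq_getElem?_getD,
    pv_sieve_get n hn p.toNat (by omega)]
  rfl

-- ---------- the two prime lists coincide ----------

lemma pv_ofList_nodup (xs : List Int) (h : xs.Nodup) : PySem.Set.ofList xs = xs := by
  have aux : ∀ (ys acc : List Int), (acc ++ ys).Nodup →
      List.foldl PySem.Set.add acc ys = acc ++ ys := by
    intro ys
    induction ys with
    | nil => intro acc _; simp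
    | cons y ys ih =>
      intro acc hnd
      have hy : y ∉ acc := by
        rcases List.nodup_append.mp hnd with ⟨-, -, hdis⟩
        exact fun hmem => hdis y hmem y List.mem_cons_self rfl
      show List.foldl PySem.Set.add (PySem.Set.add acc y) ys = acc ++ y :: ys
      have hadd : PySem.Set.add acc y = acc ++ [y] := by
        unfold PySem.Set.add
        rw [if_neg (by simpa using hy)]
      rw [hadd, ih (acc ++ [y]) (by simpa using hnd)]
      simp
  simpa using aux xs [] (by simpa using h)

lemma pv_pyRange_pairwise (a b s : Int) (hs : 0 < s) :
    (PySem.List.pyRange a b s).Pairwise (· < ·) := by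
  rw [PySem.List.pyRange_of_pos a b hs]
  refine List.pairwise_map.mpr (List.pairwise_lt_range.imp ?_)
  intro k1 k2 hk
  have : (k1 : Int) < (k2 : Int) := by exact_mod_cast hk
  nlinarith

lemma primes_eq (start end_ : Int) :
    ((PySem.Set.ofList ((2 : Int) :: (PySem.List.pyRange 3 end_ 2).filter (fun n => pvA_isPrime n))).filter
        (fun p => decide (start ≤ p) && decide (p < end_)))
      = (PySem.List.pyRange (max start 2) end_ 1).filter
          (fun p => PySem.List.pyGetD (pvSieve (max end_ 2)) p false) := by
  have hpw0 : ((PySem.List.pyRange 3 end_ 2).filter (fun n => pvA_isPrime n)).Pairwise (· < ·) :=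
    (pv_pyRange_pairwise 3 end_ 2 (by norm_num)).filter _
  have hpw1 : ((2 : Int) :: (PySem.List.pyRange 3 end_ 2).filter (fun n => pvA_isPrime n)).Pairwise (· < ·) := by
    refine List.pairwise_cons.mpr ⟨?_, hpw0⟩
    intro p hp
    have := (PySem.List.mem_pyRange_iff_of_pos (by norm_num) p).mp (List.mem_of_mem_filter hp)
    omega
  rw [pv_ofList_nodup _ (List.Pairwise.imp ne_of_lt hpw1)]
  have hpwL := hpw1.filter (fun p => decide (start ≤ p) && decide (p < end_))
  have hpwR := (pv_pyRange_pairwise (max start 2) end_ 1 (by norm_num)).filter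
    (fun p => PySem.List.pyGetD (pvSieve (max end_ 2)) p false)
  refine List.Perm.eq_of_pairwise (le := (· < ·))
    (fun a b _ _ hab hba => absurd hba (lt_asymm hab)) hpwL hpwR ?_
  refine (List.perm_ext_iff_of_nodup (hpwL.imp ne_of_lt) (hpwR.imp ne_of_lt)).mpr ?_
  intro p
  simp only [List.mem_filter, List.mem_cons, Bool.and_eq_true, decide_eq_true_eq,
    PySem.List.mem_pyRange_one,
    PySem.List.mem_pyRange_iff_of_pos (show (0 : Int) < 2 by norm_num)]
  have hm2 : (2 : Int) ≤ max end_ 2 := le_max_right _ _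
  constructor
  · rintro ⟨h_or, hstart, hlt⟩
    rcases h_or with rfl | hmem
    · refine ⟨⟨by omega, hlt⟩, ?_⟩
      rw [pv_sieve_lookup _ _ hm2 (by norm_num) (by omega)]
      simp [Nat.prime_two]
    · obtain ⟨⟨h3p, hplt, hdvd2⟩, hA⟩ := hmem
      refine ⟨⟨by omega, hplt⟩, ?_⟩
      rw [pv_sieve_lookup _ _ hm2 (by omega) (by omega)]
      rw [pvA_isPrime_eq _ (by omega)] at hA
      exact hA
  · rintro ⟨⟨hge, hlt⟩, hB⟩
    rw [pv_sieve_lookup _ _ hm2 (by omega) (by omega)] at hB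
    have hpr : Nat.Prime p.toNat := by simpa using hB
    by_cases hp2 : p = 2
    · subst hp2
      exact ⟨Or.inl rfl, by omega, hlt⟩
    · have h3p : 3 ≤ p := by omega
      have hodd : ¬ 2 ∣ p.toNat := by
        intro hdvd
        rcases hpr.eq_one_or_self_of_dvd 2 hdvd with h | h <;> omega
      refine ⟨Or.inr ⟨⟨h3p, hlt, ?_⟩, ?_⟩, by omega, hlt⟩
      · omega
      · rw [pvA_isPrime_eq _ (by omega)]
        simp [hpr]

-- ---------- pair loops ----------

lemma pv_mem_cwr (L : List Int) : ∀ x y : Int, (x, y) ∈ pvA_cwr L → x ∈ L ∧ y ∈ L := by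
  induction L with
  | nil => intro x y h; simp [pvA_cwr] at h
  | cons a L ih =>
    intro x y h
    rw [pvA_cwr, List.mem_append] at h
    rcases h with h | h
    · obtain ⟨z, hz, hzeq⟩ := List.mem_map.mp h
      cases hzeq
      exact ⟨List.mem_cons_self, hz⟩
    · have := ih x y h
      exact ⟨List.mem_cons_of_mem _ this.1, List.mem_cons_of_mem _ this.2⟩

lemma pv_inner_eq (f : Int → Int → Int) (L : List Int) : ∀ (pref : List Int) (c : Int),
    (PySem.List.pyRange (pref.length : Int) (((pref.length + L.length : Nat)) : Int) 1).foldl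
      (fun c j => f c (PySem.List.pyGetD (pref ++ L) j 0)) c = L.foldl f c := by
  induction L with
  | nil =>
    intro pref c
    rw [PySem.List.pyRange_one_eq_nil (by simp)]
    rfl
  | cons x xs ih =>
    intro pref c
    rw [PySem.List.pyRange_one_cons (by push_cast [List.length_cons]; omega), List.foldl_cons]
    have hget : PySem.List.pyGetD (pref ++ x :: xs) ((pref.length : Nat) : Int) 0 = x := by
      rw [PySem.List.pyGetD_natCast, List.getD_eq_getElem?_getD,
        List.getElem?_append_right (le_refl _)]
      simp
    rw [hget]
    have := ih (pref ++ [x]) (f c x)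
    have e1 : ((pref ++ [x]).length : Int) = (pref.length : Int) + 1 := by simp
    have e2 : (((pref ++ [x]).length + xs.length : Nat) : Int) = ((pref.length + (x :: xs).length : Nat) : Int) := by
      simp; ring
    have e3 : (pref ++ [x]) ++ xs = pref ++ x :: xs := by simp
    rw [e1, e2, e3] at this
    rw [this, List.foldl_cons]

lemma pv_outer_eq (g : Int → Int → Bool) (L : List Int) : ∀ (pref : List Int) (c : Int),
    (PySem.List.pyRange (pref.length : Int) (((pref.length + L.length : Nat)) : Int) 1).foldl
      (fun c i =>
        (PySem.List.pyRange i (((pref.length + L.length : Nat)) : Int) 1).foldl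
          (fun c j =>
            if g (PySem.List.pyGetD (pref ++ L) i 0) (PySem.List.pyGetD (pref ++ L) j 0)
            then c + 1 else c) c) c
      = (pvA_cwr L).foldl (fun c xy => if g xy.1 xy.2 then c + 1 else c) c := by
  induction L with
  | nil =>
    intro pref c
    rw [PySem.List.pyRange_one_eq_nil (by simp)]
    rfl
  | cons x xs ih =>
    intro pref c
    rw [PySem.List.pyRange_one_cons (by push_cast [List.length_cons]; omega), List.foldl_cons]
    have hget : PySem.List.pyGetD (pref ++ x :: xs) ((pref.length : Nat) : Int) 0 = x := by
      rw [PySem.List.pyGetD_natCast, List.getD_eq_getElem?_getD,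
        List.getElem?_append_right (le_refl _)]
      simp
    rw [hget]
    have hinner := pv_inner_eq (fun c y => if g x y then c + 1 else c) (x :: xs) pref c
    rw [hinner]
    have hA : (pvA_cwr (x :: xs)).foldl (fun c xy => if g xy.1 xy.2 then c + 1 else c) c
        = (pvA_cwr xs).foldl (fun c xy => if g xy.1 xy.2 then c + 1 else c)
            ((x :: xs).foldl (fun c y => if g x y then c + 1 else c) c) := by
      rw [pvA_cwr, List.foldl_append, List.foldl_map]
    rw [hA]
    have := ih (pref ++ [x]) ((x :: xs).foldl (fun c y => if g x y then c + 1 else c) c)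
    have e1 : ((pref ++ [x]).length : Int) = (pref.length : Int) + 1 := by simp
    have e2 : (((pref ++ [x]).length + xs.length : Nat) : Int) = ((pref.length + (x :: xs).length : Nat) : Int) := by
      simp; ring
    have e3 : (pref ++ [x]) ++ xs = pref ++ x :: xs := by simp
    rw [e1, e2, e3] at this
    rw [this]

lemma pv_check_eq (end_ x y : Int) (hx2 : 2 ≤ x) (hx : x < end_) (hy2 : 2 ≤ y) (hy : y < end_) :
    pvA_isPrime (pvA_digitSum (x * y)) =
      PySem.List.pyGetD (pvSieve (pvB_bound (max end_ 2 * max end_ 2) 0 + 1))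
        (pvB_dsum (x * y) 0) false := by
  set m : Int := max end_ 2 with hm
  have hm2 : 2 ≤ m := le_max_right _ _
  have hz4 : 4 ≤ x * y := by nlinarith
  have hzlt : x * y < m * m := by
    have hxm : x ≤ m - 1 := by omega
    have hym : y ≤ m - 1 := by omega
    nlinarith
  set k : Nat := pvNdig (m * m).toNat with hk
  have hbound : pvB_bound (m * m) 0 = (9 * k : Nat) := by
    rw [pvB_bound_eq _ _ (by nlinarith)]
    push_cast
    ring
  have hk1 : 1 ≤ k := pv_ndig_pos _ (by omega)
  have hds : pvDsN (x * y).toNat ≤ 9 * k := by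
    refine pv_dsN_le k _ ?_
    have h1 : (x * y).toNat < (m * m).toNat := by omega
    have h2 := pv_lt_pow_ndig (m * m).toNat
    rw [← hk] at h2
    omega
  rw [pvB_dsum_eq _ _ (by omega), pvA_digitSum_eq _ (by omega), hbound]
  rw [pv_sieve_lookup _ _ (by push_cast; omega) (by positivity) (by push_cast; omega)]
  rw [pvA_isPrime_eq _ (by positivity)]
  congr 2
  omega

-- ===== VERDICT (by name: the statement is the Claim_ definition above) =====
theorem count_prime_pairs_reverting_to_prime_spec : Claim_equal_count_prime_pairs_reverting_to_prime := by
  intro start end_ _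
  unfold Spec_count_prime_pairs_reverting_to_prime
  show (pvA_cwr (((PySem.Set.ofList ((2 : Int) :: (PySem.List.pyRange 3 end_ 2).filter (fun n => pvA_isPrime n))).filter
        (fun p => decide (start ≤ p) && decide (p < end_))))).foldl
      (fun c xy => if pvA_isPrime (pvA_digitSum (xy.1 * xy.2)) then c + 1 else c) 0
      = (PySem.List.pyRange 0
            (PySem.List.len ((PySem.List.pyRange (max start 2) end_ 1).filter
              (fun p => PySem.List.pyGetD (pvSieve (max end_ 2)) p false))) 1).foldl
          (fun c i =>
            (PySem.List.pyRange i
                (PySem.List.len ((PySem.List.pyRange (max start 2) end_ 1).filter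
                  (fun p => PySem.List.pyGetD (pvSieve (max end_ 2)) p false))) 1).foldl
              (fun c j =>
                if PySem.List.pyGetD (pvSieve (pvB_bound (max end_ 2 * max end_ 2) 0 + 1))
                    (pvB_dsum
                      (PySem.List.pyGetD ((PySem.List.pyRange (max start 2) end_ 1).filter
                          (fun p => PySem.List.pyGetD (pvSieve (max end_ 2)) p false)) i 0 *
                        PySem.List.pyGetD ((PySem.List.pyRange (max start 2) end_ 1).filter
                          (fun p => PySem.List.pyGetD (pvSieve (max end_ 2)) p false)) j 0) 0) false
                then c + 1 else c) c) 0
  rw [primes_eq start end_]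
  set ps := (PySem.List.pyRange (max start 2) end_ 1).filter
      (fun p => PySem.List.pyGetD (pvSieve (max end_ 2)) p false) with hps
  have hmem : ∀ p ∈ ps, 2 ≤ p ∧ p < end_ := by
    intro p hp
    have h1 := (List.mem_filter.mp hp).1
    have := PySem.List.mem_pyRange_one.mp h1
    constructor <;> omega
  have hcongr : (pvA_cwr ps).foldl
      (fun c xy => if pvA_isPrime (pvA_digitSum (xy.1 * xy.2)) then c + 1 else c) (0 : Int)
      = (pvA_cwr ps).foldl
      (fun c xy =>
        if PySem.List.pyGetD (pvSieve (pvB_bound (max end_ 2 * max end_ 2) 0 + 1))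
            (pvB_dsum (xy.1 * xy.2) 0) false then c + 1 else c) (0 : Int) := by
    refine PySem.List.foldl_congr_mem _ _ _ _ ?_
    intro c xy hxy
    obtain ⟨hx, hy⟩ := pv_mem_cwr ps xy.1 xy.2 (by simpa using hxy)
    obtain ⟨hx2, hxlt⟩ := hmem _ hx
    obtain ⟨hy2, hylt⟩ := hmem _ hy
    rw [pv_check_eq end_ xy.1 xy.2 hx2 hxlt hy2 hylt]
  rw [hcongr]
  have hout := pv_outer_eq
    (fun x y =>
      PySem.List.pyGetD (pvSieve (pvB_bound (max end_ 2 * max end_ 2) 0 + 1))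
        (pvB_dsum (x * y) 0) false) ps [] 0
  simp only [List.nil_append, List.length_nil, Nat.zero_add, Nat.cast_zero] at hout
  simp only [PySem.List.len_eq]
  exact hout.symm
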